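-- pv_equiv track=rewrite | github.com/cmaulany/aoc2015 | day22/day22.py | do_effects
-- ===== SOURCE A (Python) =====
-- def do_effects(game):
--     player, boss, effects = game
--     next_effects = []
--     shield = any(name == "shield" for name, _ in effects)
--     player = (player[0], player[1], 7 if shield else 0, player[3])
--     for name, n in effects:
--         if name == "poison":
--             boss = (boss[0] - 3, boss[1])
--         elif name == "recharge":
--             player = (player[0], player[1] + 101, player[2], player[3])
--
--         if n > 1:
--             next_effects.append((name, n - 1))
--     return (player, boss, tuple(next_effects))
-- ===== SOURCE B (Python) =====
-- def do_effects(game):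
--     player, boss, effects = game
--     poison = sum(1 for name, _ in effects if name == "poison")
--     recharge = sum(1 for name, _ in effects if name == "recharge")
--     shield = 7 if any(name == "shield" for name, _ in effects) else 0
--     player = (player[0], player[1] + 101 * recharge, shield, player[3])
--     if poison:
--         boss = (boss[0] - 3 * poison, boss[1])
--     next_effects = tuple((name, n - 1) for name, n in effects if n > 1)
--     return (player, boss, next_effects)
-- ===== Notes on version B (the rewrite author's own statement) =====
-- stated objective: simpler
-- what changed: Replaces the single stateful loop that repeatedly rebuilds the player and boss tuples with independent aggregate passes (count of poison, count of recharge, any shield) and a closed-form construction of each output component, plus one comprehension for the ticked-down effects.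
import Mathlib
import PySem

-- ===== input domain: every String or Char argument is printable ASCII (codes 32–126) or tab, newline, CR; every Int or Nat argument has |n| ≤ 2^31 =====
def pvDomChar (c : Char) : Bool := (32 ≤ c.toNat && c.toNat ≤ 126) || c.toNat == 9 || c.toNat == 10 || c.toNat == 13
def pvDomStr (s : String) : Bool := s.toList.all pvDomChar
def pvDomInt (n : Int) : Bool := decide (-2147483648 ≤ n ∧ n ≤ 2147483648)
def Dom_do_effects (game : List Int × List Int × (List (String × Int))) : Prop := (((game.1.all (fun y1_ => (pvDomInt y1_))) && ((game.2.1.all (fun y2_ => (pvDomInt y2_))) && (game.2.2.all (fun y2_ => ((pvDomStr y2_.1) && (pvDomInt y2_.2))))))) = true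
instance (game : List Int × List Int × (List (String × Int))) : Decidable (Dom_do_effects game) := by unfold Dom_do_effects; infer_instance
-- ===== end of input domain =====

-- B replaces A's single stateful loop with independent aggregate passes (counts / any) and a
-- closed-form construction of each output component (objective: simpler).


-- ===== PORT A =====
-- literal port of A: shield scan, then one fold carrying (player, boss, next_effects);
-- the loop body is the helper doEffectsStep.  player[i]/boss[i] ported with pyGet?
-- (Pre_ guarantees the indices are in range; .getD 0 totalises).
def doEffectsStep (st : List Int × List Int × List (String × Int)) (e : String × Int) :
    List Int × List Int × List (String × Int) :=
  let p := st.1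
  let b := st.2.1
  let acc := st.2.2
  let pb : List Int × List Int :=
    if e.1 == "poison" then
      (p, [(PySem.List.pyGet? b 0).getD 0 - 3, (PySem.List.pyGet? b 1).getD 0])
    else if e.1 == "recharge" then
      ([(PySem.List.pyGet? p 0).getD 0, (PySem.List.pyGet? p 1).getD 0 + 101,
        (PySem.List.pyGet? p 2).getD 0, (PySem.List.pyGet? p 3).getD 0], b)
    else (p, b)
  let acc' := if e.2 > 1 then acc ++ [(e.1, e.2 - 1)] else acc
  (pb.1, pb.2, acc')

def do_effects (game : List Int × List Int × (List (String × Int))) : List Int × List Int × (List (String × Int)) :=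
  let player := game.1
  let boss := game.2.1
  let effects := game.2.2
  let shield := effects.any (fun e => e.1 == "shield")
  let player1 : List Int :=
    [(PySem.List.pyGet? player 0).getD 0, (PySem.List.pyGet? player 1).getD 0,
     if shield then 7 else 0, (PySem.List.pyGet? player 3).getD 0]
  effects.foldl doEffectsStep (player1, boss, [])

-- ===== PORT B =====
def do_effects_alt (game : List Int × List Int × (List (String × Int))) : List Int × List Int × (List (String × Int)) :=
  let player := game.1
  let boss := game.2.1
  let effects := game.2.2
  let poison : Int := effects.countP (fun e => e.1 == "poison")
  let recharge : Int := effects.countP (fun e => e.1 == "recharge")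
  let shield : Int := if effects.any (fun e => e.1 == "shield") then 7 else 0
  let newPlayer : List Int :=
    [(PySem.List.pyGet? player 0).getD 0, (PySem.List.pyGet? player 1).getD 0 + 101 * recharge,
     shield, (PySem.List.pyGet? player 3).getD 0]
  let newBoss : List Int :=
    if poison ≠ 0 then
      [(PySem.List.pyGet? boss 0).getD 0 - 3 * poison, (PySem.List.pyGet? boss 1).getD 0]
    else boss
  let nextEffects := (effects.filter (fun e => e.2 > 1)).map (fun e => (e.1, e.2 - 1))
  (newPlayer, newBoss, nextEffects)

-- ===== PRECONDITION & SPEC =====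
-- Pre_ is exactly the domain of A: the player needs its four fields (player[0], player[1], player[3]
-- are read), and the boss needs its two fields only when a poison effect is active (otherwise A never
-- indexes the boss); outside Pre_ both Pythons raise IndexError.
def Pre_do_effects (game : List Int × List Int × (List (String × Int))) : Prop :=
  4 ≤ game.1.length ∧ ((game.2.2.any (fun e => e.1 == "poison")) = true → 2 ≤ game.2.1.length)
instance (game : List Int × List Int × (List (String × Int))) : Decidable (Pre_do_effects game) := by
  unfold Pre_do_effects; infer_instance
def pvWitness_do_effects : (List Int × List Int × (List (String × Int))) :=
  ([50, 500, 0, 0], [58, 9], [("shield", 3), ("poison", 2), ("recharge", 1)])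
def Spec_do_effects (game : List Int × List Int × (List (String × Int))) (out : List Int × List Int × (List (String × Int))) : Prop := out = do_effects_alt game
instance (game : List Int × List Int × (List (String × Int))) (out : List Int × List Int × (List (String × Int))) : Decidable (Spec_do_effects game out) := by unfold Spec_do_effects; infer_instance

-- ===== CLAIM (what is proved, stated in full; the proofs are below) =====
def Claim_equal_do_effects : Prop := ∀ (game : List Int × List Int × (List (String × Int))), Dom_do_effects game → Pre_do_effects game → Spec_do_effects game (do_effects game)

-- ===== LEMMAS AND PROOFS =====

theorem pyGet_cons0 (a : Int) (l : List Int) : (PySem.List.pyGet? (a :: l) 0).getD 0 = a := by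
  have h : (0:Int) ≤ (l.length : Int) + 1 := by omega
  simp [PySem.List.pyGet?, PySem.List.pyIdx?, h]

theorem pyGet_cons1 (a b : Int) (l : List Int) : (PySem.List.pyGet? (a :: b :: l) 1).getD 0 = b := by
  have h : (1:Int) ≤ (l.length : Int) + 2 := by omega
  simp [PySem.List.pyGet?, PySem.List.pyIdx?, h]


-- A's loop when no poison effect is active: the boss is never touched
theorem do_effects_loop_no_poison (effects : List (String × Int))
    (x0 x1 x2 x3 : Int) (b : List Int) (acc : List (String × Int))
    (h : effects.any (fun e => e.1 == "poison") = false) :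
    effects.foldl doEffectsStep ([x0, x1, x2, x3], b, acc)
    = ([x0, x1 + 101 * (effects.countP (fun e => e.1 == "recharge") : Int), x2, x3],
       b,
       acc ++ (effects.filter (fun e => e.2 > 1)).map (fun e => (e.1, e.2 - 1))) := by
  induction effects generalizing x0 x1 x2 x3 acc with
  | nil => simp
  | cons e es ih =>
    simp only [List.any_cons, Bool.or_eq_false_iff] at h
    obtain ⟨hp, hes⟩ := h
    rw [List.foldl_cons]
    by_cases hr : e.1 = "recharge"
    · have hstep : doEffectsStep ([x0, x1, x2, x3], b, acc) e
          = ([x0, x1 + 101, x2, x3], b,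
             if e.2 > 1 then acc ++ [(e.1, e.2 - 1)] else acc) := by
        simp [doEffectsStep, hr, pyGet_cons0, pyGet_cons1]
      rw [hstep, ih _ _ _ _ _ hes]
      by_cases hn : e.2 > 1 <;>
        simp [List.countP_cons, List.filter_cons, hp, hr, hn] <;> (push_cast; ring)
    · have hstep : doEffectsStep ([x0, x1, x2, x3], b, acc) e
          = ([x0, x1, x2, x3], b,
             if e.2 > 1 then acc ++ [(e.1, e.2 - 1)] else acc) := by
        simp only [doEffectsStep]
        simp [hp, hr]
      rw [hstep, ih _ _ _ _ _ hes]
      by_cases hn : e.2 > 1 <;>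
        simp [List.countP_cons, List.filter_cons, hp, hr, hn]

-- A's loop when the boss has its two fields: poison damage accumulates on the head field
theorem do_effects_loop_poison (effects : List (String × Int))
    (x0 x1 x2 x3 b0 b1 : Int) (t : List Int) (acc : List (String × Int))
    (h : effects.any (fun e => e.1 == "poison") = true) :
    effects.foldl doEffectsStep ([x0, x1, x2, x3], b0 :: b1 :: t, acc)
    = ([x0, x1 + 101 * (effects.countP (fun e => e.1 == "recharge") : Int), x2, x3],
       [b0 - 3 * (effects.countP (fun e => e.1 == "poison") : Int), b1],
       acc ++ (effects.filter (fun e => e.2 > 1)).map (fun e => (e.1, e.2 - 1))) := by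
  induction effects generalizing x0 x1 x2 x3 b0 b1 t acc with
  | nil => simp at h
  | cons e es ih =>
    rw [List.foldl_cons]
    by_cases hp : e.1 = "poison"
    · have hstep : doEffectsStep ([x0, x1, x2, x3], b0 :: b1 :: t, acc) e
          = ([x0, x1, x2, x3], [b0 - 3, b1],
             if e.2 > 1 then acc ++ [(e.1, e.2 - 1)] else acc) := by
        simp [doEffectsStep, hp, pyGet_cons0, pyGet_cons1]
      rw [hstep]
      cases hes : es.any (fun e => e.1 == "poison") with
      | true =>
        rw [ih _ _ _ _ _ _ _ _ hes]
        by_cases hn : e.2 > 1 <;>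
          simp [List.countP_cons, List.filter_cons, hp, hn] <;> (push_cast; ring)
      | false =>
        rw [do_effects_loop_no_poison _ _ _ _ _ _ _ hes]
        have hz : es.countP (fun e => e.1 == "poison") = 0 := by
          rw [List.countP_eq_zero]
          intro a ha
          have := List.any_eq_false.mp hes a ha
          simpa using this
        by_cases hn : e.2 > 1 <;>
          simp [List.countP_cons, List.filter_cons, hp, hn, hz] <;> (push_cast; ring)
    · by_cases hr : e.1 = "recharge"
      · have hstep : doEffectsStep ([x0, x1, x2, x3], b0 :: b1 :: t, acc) e
            = ([x0, x1 + 101, x2, x3], b0 :: b1 :: t,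
               if e.2 > 1 then acc ++ [(e.1, e.2 - 1)] else acc) := by
          simp [doEffectsStep, hp, hr, pyGet_cons0, pyGet_cons1]
        have hes : es.any (fun e => e.1 == "poison") = true := by
          simp only [List.any_cons] at h
          rcases Bool.or_eq_true_iff.mp h with h1 | h2
          · exact absurd (by simpa using h1) hp
          · exact h2
        rw [hstep, ih _ _ _ _ _ _ _ _ hes]
        by_cases hn : e.2 > 1 <;>
          simp [List.countP_cons, List.filter_cons, hp, hr, hn] <;> (push_cast; ring)
      · have hstep : doEffectsStep ([x0, x1, x2, x3], b0 :: b1 :: t, acc) e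
            = ([x0, x1, x2, x3], b0 :: b1 :: t,
               if e.2 > 1 then acc ++ [(e.1, e.2 - 1)] else acc) := by
          simp only [doEffectsStep]
          simp [hp, hr]
        have hes : es.any (fun e => e.1 == "poison") = true := by
          simp only [List.any_cons] at h
          rcases Bool.or_eq_true_iff.mp h with h1 | h2
          · exact absurd (by simpa using h1) hp
          · exact h2
        rw [hstep, ih _ _ _ _ _ _ _ _ hes]
        by_cases hn : e.2 > 1 <;>
          simp [List.countP_cons, List.filter_cons, hp, hr, hn]

-- ===== VERDICT (by name: the statement is the Claim_ definition above) =====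
theorem do_effects_spec : Claim_equal_do_effects := by
  unfold Claim_equal_do_effects
  rintro ⟨player, boss, effects⟩ _ ⟨hplen, hblen⟩
  obtain ⟨x0, player, rfl⟩ : ∃ y t, player = y :: t := by
    cases player with | nil => simp at hplen | cons a t => exact ⟨a, t, rfl⟩
  obtain ⟨x1, player, rfl⟩ : ∃ y t, player = y :: t := by
    cases player with | nil => simp at hplen | cons a t => exact ⟨a, t, rfl⟩
  obtain ⟨x2, player, rfl⟩ : ∃ y t, player = y :: t := by
    cases player with | nil => simp at hplen | cons a t => exact ⟨a, t, rfl⟩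
  obtain ⟨x3, player, rfl⟩ : ∃ y t, player = y :: t := by
    cases player with | nil => simp at hplen | cons a t => exact ⟨a, t, rfl⟩
  cases hpo : effects.any (fun e => e.1 == "poison") with
  | true =>
    obtain ⟨b0, b1, t, rfl⟩ : ∃ y z t, boss = y :: z :: t := by
      have := hblen hpo
      match boss, this with
      | y :: z :: t, _ => exact ⟨y, z, t, rfl⟩
    simp only [Spec_do_effects, do_effects, do_effects_alt]
    rw [do_effects_loop_poison _ _ _ _ _ _ _ _ _ hpo]
    have hcz : effects.countP (fun e => e.1 == "poison") ≠ 0 := by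
      intro h0
      rcases List.any_eq_true.mp hpo with ⟨e, he, hpe⟩
      exact absurd hpe (by simpa using List.countP_eq_zero.mp h0 e he)
    simp [pyGet_cons0, pyGet_cons1, hpo, hcz]
  | false =>
    simp only [Spec_do_effects, do_effects, do_effects_alt]
    rw [do_effects_loop_no_poison _ _ _ _ _ _ _ hpo]
    have hcz : effects.countP (fun e => e.1 == "poison") = 0 := by
      rw [List.countP_eq_zero]
      intro a ha
      have := List.any_eq_false.mp hpo a ha
      simpa using this
    simp [hpo, hcz]
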